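-- pv_equiv track=rewrite | github.com/areumsim/Lfactory-anomaly-explainer | scripts/speccnn_grid_search.py | _temporal_3fold_indices
-- ===== SOURCE A (Python) =====
-- def _temporal_3fold_indices(n, num_folds=3):
--     """Generate temporal (non-shuffled) fold indices."""
--     fold_size = n // num_folds
--     folds = []
--     for i in range(num_folds):
--         val_start = i * fold_size
--         val_end = val_start + fold_size if i < num_folds - 1 else n
--         train_idx = list(range(0, val_start)) + list(range(val_end, n))
--         val_idx = list(range(val_start, val_end))
--         folds.append((train_idx, val_idx))
--     return folds
-- ===== SOURCE B (Python) =====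
-- def _temporal_3fold_indices(n, num_folds=3):
--     """Generate temporal (non-shuffled) fold indices by labeling each index
--     with the fold it belongs to, then grouping indices by label."""
--     fold_size = n // num_folds
--     labels = [min(j // fold_size, num_folds - 1) if fold_size else num_folds - 1
--               for j in range(n)] if num_folds > 0 else []
--     folds = []
--     for f in range(num_folds):
--         train_idx = [j for j, lab in enumerate(labels) if lab != f]
--         val_idx = [j for j, lab in enumerate(labels) if lab == f]
--         folds.append((train_idx, val_idx))
--     return folds
-- ===== Notes on version B (the rewrite author's own statement) =====
-- stated objective: alternative
-- what changed: B assigns each index a fold label (min(j // fold_size, num_folds-1)) in one labeling pass, then forms each fold by partitioning the labeled indices into val (label == f) and train (label != f), instead of A's per-fold range-boundary arithmetic.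
-- outside the precondition, e.g. on _temporal_3fold_indices(-1, 3): A returns [([], []), ([-2], []), ([], [-2])], B returns [([], []), ([], []), ([], [])]; on _temporal_3fold_indices(5, 0): A raises ZeroDivisionError, B raises ZeroDivisionError
import Mathlib
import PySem

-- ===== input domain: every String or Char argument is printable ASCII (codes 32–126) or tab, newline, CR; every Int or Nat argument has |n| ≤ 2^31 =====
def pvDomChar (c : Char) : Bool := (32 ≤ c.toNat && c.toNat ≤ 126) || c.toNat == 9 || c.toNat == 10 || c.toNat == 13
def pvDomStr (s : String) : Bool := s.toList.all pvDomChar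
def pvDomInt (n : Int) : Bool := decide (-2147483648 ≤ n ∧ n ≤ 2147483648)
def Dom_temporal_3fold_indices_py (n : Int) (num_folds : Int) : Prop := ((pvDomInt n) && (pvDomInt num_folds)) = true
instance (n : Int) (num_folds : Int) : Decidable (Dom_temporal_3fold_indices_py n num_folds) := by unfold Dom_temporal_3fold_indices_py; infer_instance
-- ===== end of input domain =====

-- B labels every index with the fold it belongs to (min(j // fold_size, num_folds-1)) and then
-- partitions the labeled indices per fold, instead of A's per-fold range-boundary arithmetic.

-- ===== PORT A =====
def temporal_3fold_indices_py (n : Int) (num_folds : Int) : List (List Int × List Int) :=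
  let fold_size := PySem.Int.floordiv n num_folds
  (PySem.List.pyRange 0 num_folds 1).foldl (fun folds i =>
    let val_start := i * fold_size
    let val_end := if i < num_folds - 1 then val_start + fold_size else n
    let train_idx := PySem.List.pyRange 0 val_start 1 ++ PySem.List.pyRange val_end n 1
    let val_idx := PySem.List.pyRange val_start val_end 1
    folds ++ [(train_idx, val_idx)]) []

-- ===== PORT B =====
def temporal_3fold_indices_py_alt (n : Int) (num_folds : Int) : List (List Int × List Int) :=
  let fold_size := PySem.Int.floordiv n num_folds
  let labels := if 0 < num_folds then
      (PySem.List.pyRange 0 n 1).map (fun j =>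
        if fold_size ≠ 0 then min (PySem.Int.floordiv j fold_size) (num_folds - 1)
        else num_folds - 1)
    else []
  (PySem.List.pyRange 0 num_folds 1).foldl (fun folds f =>
    let train_idx := ((PySem.List.enumerate labels 0).filter (fun p => p.2 != f)).map (·.1)
    let val_idx := ((PySem.List.enumerate labels 0).filter (fun p => p.2 == f)).map (·.1)
    folds ++ [(train_idx, val_idx)]) []

-- ===== PRECONDITION & SPEC =====
-- Pre_ excludes num_folds = 0 (A raises ZeroDivisionError) and negative n with positive
-- num_folds: a negative sample count is outside the function's natural domain, no fold split
-- is specified there, and A and B return different (equally unspecified) placeholder values.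
def Pre_temporal_3fold_indices_py (n : Int) (num_folds : Int) : Prop :=
  num_folds ≠ 0 ∧ (0 ≤ n ∨ num_folds < 0)
instance (n : Int) (num_folds : Int) : Decidable (Pre_temporal_3fold_indices_py n num_folds) := by
  unfold Pre_temporal_3fold_indices_py; infer_instance
def pvWitness_temporal_3fold_indices_py : Int × Int := (10, 3)

def Spec_temporal_3fold_indices_py (n : Int) (num_folds : Int) (out : List (List Int × List Int)) : Prop := out = temporal_3fold_indices_py_alt n num_folds
instance (n : Int) (num_folds : Int) (out : List (List Int × List Int)) : Decidable (Spec_temporal_3fold_indices_py n num_folds out) := by unfold Spec_temporal_3fold_indices_py; infer_instance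

-- ===== CLAIM (what is proved, stated in full; the proofs are below) =====
def Claim_equal_temporal_3fold_indices_py : Prop := ∀ (n : Int) (num_folds : Int), Dom_temporal_3fold_indices_py n num_folds → Pre_temporal_3fold_indices_py n num_folds → Spec_temporal_3fold_indices_py n num_folds (temporal_3fold_indices_py n num_folds)

-- ===== LEMMAS AND PROOFS =====

-- B's label of j equals f  ↔  j lies in fold f's [val_start, val_end) window
theorem pvLab_eq_iff (n nf f j : Int) (hnf : 0 < nf) (hn : 0 ≤ n)
    (hfnf : f < nf) (hj0 : 0 ≤ j) (hjn : j < n) :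
    ((if PySem.Int.floordiv n nf ≠ 0 then
        min (PySem.Int.floordiv j (PySem.Int.floordiv n nf)) (nf - 1) else nf - 1) = f) ↔
      (f * PySem.Int.floordiv n nf ≤ j ∧
       j < (if f < nf - 1 then f * PySem.Int.floordiv n nf + PySem.Int.floordiv n nf else n)) := by
  set fs := PySem.Int.floordiv n nf with hfs
  have hfs0 : 0 ≤ fs := by
    rw [hfs, PySem.Int.floordiv_eq_ediv_of_pos hnf]; exact Int.ediv_nonneg hn hnf.le
  by_cases hz : fs = 0
  · simp only [hz, ne_eq, not_true_eq_false, if_false, mul_zero, zero_add]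
    split_ifs with h <;> omega
  · have hzpos : 0 < fs := lt_of_le_of_ne hfs0 (Ne.symm hz)
    rw [if_pos hz, min_eq_iff]
    constructor
    · rintro (⟨hq, _⟩ | ⟨hq, hle⟩)
      · have hb := (PySem.Int.floordiv_eq_iff_of_pos hzpos).mp hq
        refine ⟨hb.1, ?_⟩
        split_ifs with h
        · have : (f + 1) * fs = f * fs + fs := by ring
          linarith [hb.2]
        · exact hjn
      · have hfq : f ≤ PySem.Int.floordiv j fs := hq ▸ hle
        refine ⟨(PySem.Int.le_floordiv_iff_mul_le hzpos).mp hfq, ?_⟩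
        rw [if_neg (by omega)]; exact hjn
    · rintro ⟨h1, h2⟩
      by_cases h : f < nf - 1
      · rw [if_pos h] at h2
        left
        have he : (f + 1) * fs = f * fs + fs := by ring
        have hq : PySem.Int.floordiv j fs = f :=
          (PySem.Int.floordiv_eq_iff_of_pos hzpos).mpr ⟨h1, by linarith⟩
        exact ⟨hq, by rw [hq]; omega⟩
      · right
        have hf : f = nf - 1 := by omega
        exact ⟨hf.symm, by rw [← hf]; exact (PySem.Int.le_floordiv_iff_mul_le hzpos).mpr h1⟩

-- filtering range(n) by an interval predicate yields the sub-range
theorem pvFilter_range (p : Int → Bool) (a b n : Int) (h0 : 0 ≤ a) (hab : a ≤ b) (hbn : b ≤ n)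
    (h : ∀ j, 0 ≤ j → j < n → (p j = true ↔ a ≤ j ∧ j < b)) :
    (PySem.List.pyRange 0 n 1).filter p = PySem.List.pyRange a b 1 := by
  have e1 : (PySem.List.pyRange 0 a 1).filter p = [] := by
    refine List.filter_eq_nil_iff.mpr fun x hx hp => ?_
    have hm := (PySem.List.mem_pyRange_one).mp hx
    have := (h x hm.1 (by omega)).mp hp
    omega
  have e2 : (PySem.List.pyRange a b 1).filter p = PySem.List.pyRange a b 1 := by
    refine List.filter_eq_self.mpr fun x hx => ?_
    have hm := (PySem.List.mem_pyRange_one).mp hx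
    exact (h x (by omega) (by omega)).mpr ⟨hm.1, hm.2⟩
  have e3 : (PySem.List.pyRange b n 1).filter p = [] := by
    refine List.filter_eq_nil_iff.mpr fun x hx hp => ?_
    have hm := (PySem.List.mem_pyRange_one).mp hx
    have := (h x (by omega) hm.2).mp hp
    omega
  rw [PySem.List.pyRange_one_append 0 a n h0 (le_trans hab hbn),
      PySem.List.pyRange_one_append a b n hab hbn, List.filter_append, List.filter_append,
      e1, e2, e3]
  simp

-- filtering range(n) by the complement of an interval predicate yields the two outer ranges
theorem pvFilter_range_compl (p : Int → Bool) (a b n : Int) (h0 : 0 ≤ a) (hab : a ≤ b) (hbn : b ≤ n)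
    (h : ∀ j, 0 ≤ j → j < n → (p j = true ↔ ¬(a ≤ j ∧ j < b))) :
    (PySem.List.pyRange 0 n 1).filter p = PySem.List.pyRange 0 a 1 ++ PySem.List.pyRange b n 1 := by
  have e1 : (PySem.List.pyRange 0 a 1).filter p = PySem.List.pyRange 0 a 1 := by
    refine List.filter_eq_self.mpr fun x hx => ?_
    have hm := (PySem.List.mem_pyRange_one).mp hx
    exact (h x hm.1 (by omega)).mpr (by omega)
  have e2 : (PySem.List.pyRange a b 1).filter p = [] := by
    refine List.filter_eq_nil_iff.mpr fun x hx hp => ?_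
    have hm := (PySem.List.mem_pyRange_one).mp hx
    have := (h x (by omega) (by omega)).mp hp
    omega
  have e3 : (PySem.List.pyRange b n 1).filter p = PySem.List.pyRange b n 1 := by
    refine List.filter_eq_self.mpr fun x hx => ?_
    have hm := (PySem.List.mem_pyRange_one).mp hx
    exact (h x (by omega) hm.2).mpr (by omega)
  rw [PySem.List.pyRange_one_append 0 a n h0 (le_trans hab hbn),
      PySem.List.pyRange_one_append a b n hab hbn, List.filter_append, List.filter_append,
      e1, e2, e3]
  simp

-- ===== VERDICT (by name: the statement is the Claim_ definition above) =====
theorem temporal_3fold_indices_py_spec : Claim_equal_temporal_3fold_indices_py := by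
  intro n nf _ hpre
  obtain ⟨hnf0, hd⟩ := hpre
  unfold Spec_temporal_3fold_indices_py temporal_3fold_indices_py temporal_3fold_indices_py_alt
  rcases lt_or_gt_of_ne hnf0 with hneg | hpos
  · rw [PySem.List.pyRange_one_eq_nil (by omega)]
    simp
  · have hn : 0 ≤ n := by rcases hd with h | h <;> omega
    set fs := PySem.Int.floordiv n nf with hfs
    have hfs0 : 0 ≤ fs := by
      rw [hfs, PySem.Int.floordiv_eq_ediv_of_pos hpos]; exact Int.ediv_nonneg hn hpos.le
    have hub : nf * fs ≤ n := by
      have h1 := PySem.Int.floordiv_mul_add_mod n nf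
      have h2 : 0 ≤ PySem.Int.mod n nf := PySem.Int.mod_nonneg n hpos
      rw [← hfs] at h1
      linarith [h1, h2]
    simp only [PySem.List.foldl_append_singleton_eq_map, List.nil_append]
    apply List.map_congr_left
    intro f hf'
    have hf := (PySem.List.mem_pyRange_one).mp hf'
    have henum : PySem.List.enumerate
        ((PySem.List.pyRange 0 n 1).map (fun j =>
          if fs ≠ 0 then min (PySem.Int.floordiv j fs) (nf - 1) else nf - 1)) 0
        = (PySem.List.pyRange 0 n 1).map (fun j =>
            (j, if fs ≠ 0 then min (PySem.Int.floordiv j fs) (nf - 1) else nf - 1)) := by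
      rw [PySem.List.enumerate_eq_map_pyRange (d := 0)]
      have hlen : PySem.List.len ((PySem.List.pyRange 0 n 1).map (fun j =>
          if fs ≠ 0 then min (PySem.Int.floordiv j fs) (nf - 1) else nf - 1)) = n := by
        simp [PySem.List.length_pyRange_one, Int.toNat_of_nonneg hn]
      rw [hlen]
      refine List.map_congr_left fun j hj => ?_
      have hm := (PySem.List.mem_pyRange_one).mp hj
      rw [PySem.List.pyGetD_map_pyRange_of_nonneg _ n j 0 hm.1 hm.2]
    rw [if_pos hpos, henum]
    simp only [List.filter_map, List.map_map, Function.comp_def]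
    -- fold f's window bounds
    set ve : Int := if f < nf - 1 then f * fs + fs else n with hve
    have hvs0 : 0 ≤ f * fs := mul_nonneg hf.1 hfs0
    have hfl : f * fs ≤ (nf - 1) * fs := mul_le_mul_of_nonneg_right (by omega) hfs0
    have hfl2 : (nf - 1) * fs ≤ nf * fs := mul_le_mul_of_nonneg_right (by omega) hfs0
    have hvsve : f * fs ≤ ve := by
      rw [hve]; split_ifs with h
      · linarith
      · linarith
    have hven : ve ≤ n := by
      rw [hve]; split_ifs with h
      · have h3 : (f + 1) * fs ≤ nf * fs := mul_le_mul_of_nonneg_right (by omega) hfs0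
        have he : (f + 1) * fs = f * fs + fs := by ring
        linarith
      · exact le_refl n
    have hlab : ∀ j, 0 ≤ j → j < n →
        (((if fs ≠ 0 then min (PySem.Int.floordiv j fs) (nf - 1) else nf - 1) = f) ↔
          (f * fs ≤ j ∧ j < ve)) := by
      intro j hj0 hjn
      rw [hve, hfs]
      exact pvLab_eq_iff n nf f j hpos hn hf.2 hj0 hjn
    have hcompl := pvFilter_range_compl
        (fun x => ((if fs ≠ 0 then min (PySem.Int.floordiv x fs) (nf - 1) else nf - 1) : Int) != f)
        (f * fs) ve n hvs0 hvsve hven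
        (fun j hj0 hjn => by rw [bne_iff_ne, ne_eq, hlab j hj0 hjn])
    have hval := pvFilter_range
        (fun x => ((if fs ≠ 0 then min (PySem.Int.floordiv x fs) (nf - 1) else nf - 1) : Int) == f)
        (f * fs) ve n hvs0 hvsve hven
        (fun j hj0 hjn => by rw [beq_iff_eq]; exact hlab j hj0 hjn)
    rw [show (fun (x : Int) => ((x, if fs ≠ 0 then min (PySem.Int.floordiv x fs) (nf - 1)
          else nf - 1) : Int × Int).1) = (fun x => x) from rfl, List.map_id', List.map_id',
        hcompl, hval]
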